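-- pv_equiv track=rewrite | github.com/ShikangGan/MetricLearning | Distance.py | isPolygonOutOfBound
-- ===== SOURCE A (Python) =====
-- Width=600
--
-- Height=400
--
-- def isPolygonOutOfBound(x,y,polygon):
--     for i in range(0,len(polygon)):
--         if i%2==0:
--             a=polygon[i]+x
--             if a<0 or a>Width:
--                 return True
--         else:
--             a=polygon[i]+y
--             if a<0 or a>Height:
--                 return True
--     return False
-- ===== SOURCE B (Python) =====
-- Width = 600
--
-- Height = 400
--
-- def isPolygonOutOfBound(x, y, polygon):
--     return any(c + x < 0 or c + x > Width for c in polygon[0::2]) \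
--         or any(c + y < 0 or c + y > Height for c in polygon[1::2])
-- ===== Notes on version B (the rewrite author's own statement) =====
-- stated objective: simpler
-- what changed: Replaces the interleaved index loop with parity branch by two slice-strand passes: any() over the x-coordinates polygon[0::2] and any() over the y-coordinates polygon[1::2].
import Mathlib
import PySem

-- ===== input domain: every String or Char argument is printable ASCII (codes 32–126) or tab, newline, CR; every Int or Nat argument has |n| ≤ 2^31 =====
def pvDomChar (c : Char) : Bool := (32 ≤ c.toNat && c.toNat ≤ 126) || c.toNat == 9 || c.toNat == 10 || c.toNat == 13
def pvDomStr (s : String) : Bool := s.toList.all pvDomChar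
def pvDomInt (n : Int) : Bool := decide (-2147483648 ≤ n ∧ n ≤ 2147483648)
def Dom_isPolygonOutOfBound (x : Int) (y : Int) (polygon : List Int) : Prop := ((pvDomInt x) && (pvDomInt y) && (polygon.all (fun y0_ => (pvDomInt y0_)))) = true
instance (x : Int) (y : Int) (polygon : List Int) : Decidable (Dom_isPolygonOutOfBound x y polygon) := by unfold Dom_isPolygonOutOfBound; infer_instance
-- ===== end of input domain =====

-- B replaces A's interleaved index loop with parity branch by two slice-strand passes
-- (any over polygon[0::2] against Width, any over polygon[1::2] against Height); simpler, same cost.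

-- ===== PORT A =====
-- A's for-i-in-range loop with early return: recursion over the (index, element) pairs
def pvAGo (x : Int) (y : Int) : List (Int × Int) → Bool
  | [] => false
  | (i, c) :: rest =>
    if i % 2 == 0 then
      let a := c + x
      if a < 0 || a > 600 then true else pvAGo x y rest
    else
      let a := c + y
      if a < 0 || a > 400 then true else pvAGo x y rest

def isPolygonOutOfBound (x : Int) (y : Int) (polygon : List Int) : Bool :=
  pvAGo x y (PySem.List.enumerate polygon 0)

-- ===== PORT B =====
def isPolygonOutOfBound_alt (x : Int) (y : Int) (polygon : List Int) : Bool :=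
  (((PySem.List.slice? polygon none none 2).getD []).any fun c =>
      decide (c + x < 0) || decide (c + x > 600)) ||
  (((PySem.List.slice? polygon (some 1) none 2).getD []).any fun c =>
      decide (c + y < 0) || decide (c + y > 400))

-- ===== PRECONDITION & SPEC =====
def Spec_isPolygonOutOfBound (x : Int) (y : Int) (polygon : List Int) (out : Bool) : Prop := out = isPolygonOutOfBound_alt x y polygon
instance (x : Int) (y : Int) (polygon : List Int) (out : Bool) : Decidable (Spec_isPolygonOutOfBound x y polygon out) := by unfold Spec_isPolygonOutOfBound; infer_instance

-- ===== CLAIM (what is proved, stated in full; the proofs are below) =====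
def Claim_equal_isPolygonOutOfBound : Prop := ∀ (x : Int) (y : Int) (polygon : List Int), Dom_isPolygonOutOfBound x y polygon → Spec_isPolygonOutOfBound x y polygon (isPolygonOutOfBound x y polygon)

-- ===== LEMMAS AND PROOFS =====

-- the even-index and odd-index strands of a list
def pvEvens {α : Type} : List α → List α
  | [] => []
  | [a] => [a]
  | a :: _ :: t => a :: pvEvens t

def pvOdds {α : Type} : List α → List α
  | [] => []
  | [_] => []
  | _ :: b :: t => b :: pvOdds t

theorem pvFilterMap_even {α : Type} (xs : List α) :
    ∀ c : Nat, c = (xs.length + 1) / 2 →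
    List.filterMap (fun k : Nat => xs[(2 * (k : Int)).toNat]?) (List.range c) = pvEvens xs := by
  induction xs using pvEvens.induct with
  | case1 => intro c hc; simp at hc; subst hc; simp [pvEvens]
  | case2 a => intro c hc
               simp at hc
               subst hc
               simp [List.range_succ, pvEvens]
  | case3 a b t ih =>
      intro c hc
      simp at hc
      have : c = (t.length + 1) / 2 + 1 := by omega
      subst this
      rw [List.range_succ_eq_map, List.filterMap_cons, List.filterMap_map]
      have h0 : (2 * ((0:Nat) : Int)).toNat = 0 := by decide
      simp only [h0]
      rw [show ((fun k : Nat => (a :: b :: t)[(2 * ((k : Nat) : Int)).toNat]?) ∘ (· + 1)) =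
             (fun k : Nat => t[(2 * (k : Int)).toNat]?) from by
        funext k
        have h1 : (2 * ((k+1 : Nat) : Int)).toNat = (2 * k + 1) + 1 := by push_cast; omega
        have h2 : (2 * ((k : Nat) : Int)).toNat = 2 * k := by omega
        show (a :: b :: t)[(2 * ((k+1 : Nat) : Int)).toNat]? = _
        rw [h1, h2, List.getElem?_cons_succ]
        rw [show 2 * k + 1 = (2 * k) + 1 from rfl, List.getElem?_cons_succ]]
      rw [ih _ rfl]
      simp [pvEvens]

theorem slice?_step2_evens {α : Type} (xs : List α) :
    PySem.List.slice? xs none none 2 = some (pvEvens xs) := by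
  rw [PySem.List.slice?, PySem.List.sliceIndices]
  norm_num
  rcases Nat.eq_zero_or_pos xs.length with h | h
  · simp [List.length_eq_zero_iff.mp h, pvEvens]
  · rw [if_pos h]
    rw [pvFilterMap_even xs ((((xs.length:Int) + 2 - 1) / 2).toNat) (by omega)]

theorem pvFilterMap_odd {α : Type} (xs : List α) :
    ∀ c : Nat, c = xs.length / 2 →
    List.filterMap (fun k : Nat => xs[(1 + 2 * (k : Int)).toNat]?) (List.range c) = pvOdds xs := by
  induction xs using pvOdds.induct with
  | case1 => intro c hc; simp at hc; subst hc; simp [pvOdds]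
  | case2 a => intro c hc
               simp at hc
               simp [hc, pvOdds]
  | case3 a b t ih =>
      intro c hc
      simp at hc
      have : c = t.length / 2 + 1 := by omega
      subst this
      rw [List.range_succ_eq_map, List.filterMap_cons, List.filterMap_map]
      have h0 : (1 + 2 * ((0:Nat) : Int)).toNat = 1 := by decide
      simp only [h0]
      rw [show ((fun k : Nat => (a :: b :: t)[(1 + 2 * ((k : Nat) : Int)).toNat]?) ∘ (· + 1)) =
             (fun k : Nat => t[(1 + 2 * (k : Int)).toNat]?) from by
        funext k
        have h1 : (1 + 2 * ((k+1 : Nat) : Int)).toNat = (2 * k + 2) + 1 := by push_cast; omega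
        have h2 : (1 + 2 * ((k : Nat) : Int)).toNat = 2 * k + 1 := by omega
        show (a :: b :: t)[(1 + 2 * ((k+1 : Nat) : Int)).toNat]? = _
        rw [h1, h2]
        rw [show (2 * k + 2) + 1 = ((2 * k + 1) + 1) + 1 from rfl, List.getElem?_cons_succ,
            List.getElem?_cons_succ]]
      rw [ih _ rfl]
      simp [pvOdds]

theorem slice?_step2_odds {α : Type} (xs : List α) :
    PySem.List.slice? xs (some 1) none 2 = some (pvOdds xs) := by
  rw [PySem.List.slice?, PySem.List.sliceIndices]
  norm_num
  rcases Nat.eq_zero_or_pos xs.length with h | h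
  · simp [List.length_eq_zero_iff.mp h, pvOdds]
  · have hmin : min (1:Int) (xs.length:Int) = 1 := by
      have : (1:Int) ≤ (xs.length:Int) := by exact_mod_cast h
      omega
    rw [hmin]
    by_cases h1 : 1 < xs.length
    · rw [if_pos h1]
      rw [pvFilterMap_odd xs ((((xs.length:Int) - 1 + 2 - 1) / 2).toNat) (by omega)]
    · rw [if_neg h1]
      rcases xs with _ | ⟨a, _ | ⟨b, t⟩⟩ <;> simp_all [pvOdds]

theorem pvAGo_strands (x y : Int) (t : List Int) : ∀ (i : Int), i % 2 = 0 →
    pvAGo x y (PySem.List.enumerate t i) =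
      ((pvEvens t).any (fun c => decide (c + x < 0) || decide (c + x > 600)) ||
       (pvOdds t).any (fun c => decide (c + y < 0) || decide (c + y > 400))) := by
  induction t using pvEvens.induct with
  | case1 => intro i h; simp [PySem.List.enumerate, pvAGo, pvEvens, pvOdds]
  | case2 a => intro i h
               simp only [PySem.List.enumerate, pvAGo, pvEvens, pvOdds, h]
               by_cases h1 : a + x < 0 <;> by_cases h2 : a + x > 600 <;> simp [h1, h2]
  | case3 a b t ih =>
      intro i h
      have hh1 : (i + 1) % 2 = 1 := by omega
      have hh2 : (i + 1 + 1) % 2 = 0 := by omega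
      simp only [PySem.List.enumerate, pvAGo, pvEvens, pvOdds, h, hh1, ih _ hh2]
      by_cases p1 : a + x < 0 <;> by_cases p2 : a + x > 600 <;>
        by_cases q1 : b + y < 0 <;> by_cases q2 : b + y > 400 <;>
        simp [p1, p2, q1, q2, Bool.or_comm]

-- ===== VERDICT (by name: the statement is the Claim_ definition above) =====
theorem isPolygonOutOfBound_spec : Claim_equal_isPolygonOutOfBound := by
  intro x y polygon _
  unfold Spec_isPolygonOutOfBound isPolygonOutOfBound isPolygonOutOfBound_alt
  rw [slice?_step2_evens, slice?_step2_odds, pvAGo_strands x y polygon 0 rfl]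
  rfl
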